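-- pv_equiv track=rewrite | github.com/annoitdotcom/label-studio-ml-backend | dcnet/inferencer/auxiliary/utils.py | get_min_max_xy
-- ===== SOURCE A (Python) =====
-- def get_min_max_xy(all_xy):
--     all_x = [x for idx, x in enumerate(all_xy) if idx % 2 == 0]
--     all_y = [x for idx, x in enumerate(all_xy) if idx % 2 == 1]
--     minx = min(all_x)
--     miny = min(all_y)
--     maxx = max(all_x)
--     maxy = max(all_y)
--     return (minx, miny, maxx, maxy)
-- ===== SOURCE B (Python) =====
-- def get_min_max_xy(all_xy):
--     minx = maxx = all_xy[0]
--     miny = maxy = all_xy[1]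
--     i = 2
--     n = len(all_xy)
--     while i < n:
--         x = all_xy[i]
--         if x < minx:
--             minx = x
--         if x > maxx:
--             maxx = x
--         if i + 1 < n:
--             y = all_xy[i + 1]
--             if y < miny:
--                 miny = y
--             if y > maxy:
--                 maxy = y
--         i += 2
--     return (minx, miny, maxx, maxy)
-- ===== Notes on version B (the rewrite author's own statement) =====
-- stated objective: alternative
-- what changed: One pass over the list two elements at a time with four running min/max accumulators, instead of building two filtered index lists via enumerate and reducing each twice with min/max; Pre_ excludes lists with fewer than two elements, on which A's min([]) raises ValueError (B also raises there, via indexing).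
-- outside the precondition, e.g. on get_min_max_xy([]): A raises ValueError, B raises IndexError; on get_min_max_xy([5]): A raises ValueError, B raises IndexError
import Mathlib
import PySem

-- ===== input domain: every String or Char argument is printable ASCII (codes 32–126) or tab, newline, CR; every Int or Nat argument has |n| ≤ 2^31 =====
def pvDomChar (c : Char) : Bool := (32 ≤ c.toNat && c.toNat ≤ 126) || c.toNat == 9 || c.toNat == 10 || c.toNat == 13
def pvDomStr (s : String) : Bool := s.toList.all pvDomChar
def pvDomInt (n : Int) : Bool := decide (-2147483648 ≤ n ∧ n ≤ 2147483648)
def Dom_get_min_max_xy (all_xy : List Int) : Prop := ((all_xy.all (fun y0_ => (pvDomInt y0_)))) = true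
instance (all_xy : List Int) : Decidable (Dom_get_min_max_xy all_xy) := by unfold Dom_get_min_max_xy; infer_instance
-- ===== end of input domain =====

-- B replaces A's two filtered index lists (built with enumerate) and four min/max reductions
-- by a single pass consuming the list two elements at a time with running accumulators (objective: alternative).

-- ===== PORT A =====
def get_min_max_xy (all_xy : List Int) : Int × Int × Int × Int :=
  let all_x := ((PySem.List.enumerate all_xy).filter (fun p => PySem.Int.mod p.1 2 == 0)).map (fun p => p.2)
  let all_y := ((PySem.List.enumerate all_xy).filter (fun p => PySem.Int.mod p.1 2 == 1)).map (fun p => p.2)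
  match PySem.List.min? all_x (fun x => x), PySem.List.min? all_y (fun x => x),
        PySem.List.max? all_x (fun x => x), PySem.List.max? all_y (fun x => x) with
  | some minx, some miny, some maxx, some maxy => (minx, miny, maxx, maxy)
  | _, _, _, _ => (0, 0, 0, 0)   -- min([]) raises ValueError in Python; excluded by Pre_

-- ===== PORT B =====
-- the while loop of Source B: two elements per step, running extrema
def getMinMaxLoop (minx maxx miny maxy : Int) : List Int → Int × Int × Int × Int
  | [] => (minx, miny, maxx, maxy)
  | [x] => ((if x < minx then x else minx), miny, (if x > maxx then x else maxx), maxy)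
  | x :: y :: rest =>
      getMinMaxLoop (if x < minx then x else minx) (if x > maxx then x else maxx)
        (if y < miny then y else miny) (if y > maxy then y else maxy) rest

def get_min_max_xy_alt (all_xy : List Int) : Int × Int × Int × Int :=
  match all_xy with
  | a :: b :: rest => getMinMaxLoop a a b b rest
  | _ => (0, 0, 0, 0)   -- all_xy[0] / all_xy[1] raises IndexError in Python; excluded by Pre_

-- ===== PRECONDITION & SPEC =====
-- Pre_: with fewer than two elements one of A's filtered lists is empty and Python's min([]) raises ValueError
-- (B's initial indexing raises there too).
def Pre_get_min_max_xy (all_xy : List Int) : Prop := 2 ≤ all_xy.length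
instance (all_xy : List Int) : Decidable (Pre_get_min_max_xy all_xy) := by unfold Pre_get_min_max_xy; infer_instance
def pvWitness_get_min_max_xy : List Int := [3, -1, 7, 2]

def Spec_get_min_max_xy (all_xy : List Int) (out : Int × Int × Int × Int) : Prop := out = get_min_max_xy_alt all_xy
instance (all_xy : List Int) (out : Int × Int × Int × Int) : Decidable (Spec_get_min_max_xy all_xy out) := by unfold Spec_get_min_max_xy; infer_instance

-- ===== CLAIM (what is proved, stated in full; the proofs are below) =====
def Claim_equal_get_min_max_xy : Prop := ∀ (all_xy : List Int), Dom_get_min_max_xy all_xy → Pre_get_min_max_xy all_xy → Spec_get_min_max_xy all_xy (get_min_max_xy all_xy)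

-- ===== LEMMAS AND PROOFS =====

-- even- and odd-indexed elements of a list
def evens : List Int → List Int
  | [] => []
  | [x] => [x]
  | x :: _ :: t => x :: evens t

def odds : List Int → List Int
  | [] => []
  | [_] => []
  | _ :: y :: t => y :: odds t

theorem enum_filter_parity (xs : List Int) : ∀ s : Int, PySem.Int.mod s 2 = 0 →
    (((PySem.List.enumerate xs s).filter (fun p => PySem.Int.mod p.1 2 == 0)).map (fun p => p.2) = evens xs ∧
     ((PySem.List.enumerate xs s).filter (fun p => PySem.Int.mod p.1 2 == 1)).map (fun p => p.2) = odds xs) := by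
  induction xs using evens.induct with
  | case1 => intro s _; simp [PySem.List.enumerate_nil, evens, odds]
  | case2 x =>
      intro s hs
      have hdvd : 2 ∣ s := (PySem.Int.mod_eq_zero_iff_dvd s 2).mp hs
      have hm0 : ¬ s % 2 = 1 := by omega
      simp [PySem.List.enumerate_cons, PySem.List.enumerate_nil, evens, odds, hdvd, hm0]
  | case3 x y t ih =>
      intro s hs
      have hdvd : 2 ∣ s := (PySem.Int.mod_eq_zero_iff_dvd s 2).mp hs
      have h2 : PySem.Int.mod (s + 1 + 1) 2 = 0 := (PySem.Int.mod_eq_zero_iff_dvd _ 2).mpr (by omega)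
      have hm1 : (s + 1) % 2 = 1 := by omega
      have hm0 : ¬ s % 2 = 1 := by omega
      obtain ⟨ihe, iho⟩ := ih (s + 1 + 1) h2
      simp [PySem.List.enumerate_cons, evens, odds, hdvd, hm1, hm0] at ihe iho ⊢
      exact ⟨ihe, iho⟩

def fmin (a : Int) (x : Int) : Int := if x < a then x else a
def fmax (a : Int) (x : Int) : Int := if x > a then x else a

theorem loop_spec : ∀ (rest : List Int) (minx maxx miny maxy : Int),
    getMinMaxLoop minx maxx miny maxy rest =
      (List.foldl fmin minx (evens rest), List.foldl fmin miny (odds rest),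
       List.foldl fmax maxx (evens rest), List.foldl fmax maxy (odds rest)) := by
  intro rest
  induction rest using evens.induct with
  | case1 => intro minx maxx miny maxy; simp [getMinMaxLoop, evens, odds]
  | case2 x => intro minx maxx miny maxy; simp [getMinMaxLoop, evens, odds, fmin, fmax]
  | case3 x y t ih =>
      intro minx maxx miny maxy
      simp [getMinMaxLoop, evens, odds, fmin, fmax, ih]

theorem foldl_fmin_mem (l : List Int) : ∀ a : Int, List.foldl fmin a l ∈ a :: l := by
  induction l with
  | nil => intro a; simp
  | cons x t ih =>
      intro a
      have := ih (fmin a x)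
      simp only [List.foldl_cons]
      rcases List.mem_cons.mp this with h | h
      · rw [h]; unfold fmin; split_ifs <;> simp
      · simp [h]

theorem foldl_fmin_le (l : List Int) : ∀ (a y : Int), y ∈ a :: l → List.foldl fmin a l ≤ y := by
  induction l with
  | nil => intro a y hy; simp at hy; simp [hy]
  | cons x t ih =>
      intro a y hy
      simp only [List.foldl_cons]
      have hfa : fmin a x ≤ a := by unfold fmin; split_ifs with h <;> omega
      have hfx : fmin a x ≤ x := by unfold fmin; split_ifs with h <;> omega
      rcases List.mem_cons.mp hy with h | h
      · exact le_trans (ih (fmin a x) (fmin a x) (by simp)) (h ▸ hfa)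
      · rcases List.mem_cons.mp h with h' | h'
        · exact le_trans (ih (fmin a x) (fmin a x) (by simp)) (h' ▸ hfx)
        · exact ih (fmin a x) y (List.mem_cons_of_mem _ h')

theorem foldl_fmax_mem (l : List Int) : ∀ a : Int, List.foldl fmax a l ∈ a :: l := by
  induction l with
  | nil => intro a; simp
  | cons x t ih =>
      intro a
      have := ih (fmax a x)
      simp only [List.foldl_cons]
      rcases List.mem_cons.mp this with h | h
      · rw [h]; unfold fmax; split_ifs <;> simp
      · simp [h]

theorem foldl_fmax_ge (l : List Int) : ∀ (a y : Int), y ∈ a :: l → y ≤ List.foldl fmax a l := by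
  induction l with
  | nil => intro a y hy; simp at hy; simp [hy]
  | cons x t ih =>
      intro a y hy
      simp only [List.foldl_cons]
      have hfa : a ≤ fmax a x := by unfold fmax; split_ifs with h <;> omega
      have hfx : x ≤ fmax a x := by unfold fmax; split_ifs with h <;> omega
      rcases List.mem_cons.mp hy with h | h
      · exact le_trans (h ▸ hfa) (ih (fmax a x) (fmax a x) (by simp))
      · rcases List.mem_cons.mp h with h' | h'
        · exact le_trans (h' ▸ hfx) (ih (fmax a x) (fmax a x) (by simp))
        · exact ih (fmax a x) y (List.mem_cons_of_mem _ h')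

-- ===== VERDICT (by name: the statement is the Claim_ definition above) =====
theorem get_min_max_xy_spec : Claim_equal_get_min_max_xy := by
  intro all_xy _ hpre
  unfold Spec_get_min_max_xy
  match all_xy, hpre with
  | a :: b :: t, _ =>
    obtain ⟨hx, hy⟩ := enum_filter_parity (a :: b :: t) 0 (by rw [PySem.Int.mod, Int.fmod_eq_emod]; omega)
    unfold get_min_max_xy
    simp only [hx, hy, evens, odds]
    rw [show get_min_max_xy_alt (a :: b :: t) = getMinMaxLoop a a b b t from rfl, loop_spec]
    cases h1 : PySem.List.min? (a :: evens t) (fun x => x) with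
    | none => simp [PySem.List.min?_eq_none_iff] at h1
    | some m1 =>
    cases h2 : PySem.List.min? (b :: odds t) (fun x => x) with
    | none => simp [PySem.List.min?_eq_none_iff] at h2
    | some m2 =>
    cases h3 : PySem.List.max? (a :: evens t) (fun x => x) with
    | none => simp [PySem.List.max?_eq_none_iff] at h3
    | some m3 =>
    cases h4 : PySem.List.max? (b :: odds t) (fun x => x) with
    | none => simp [PySem.List.max?_eq_none_iff] at h4
    | some m4 =>
    have e1 : m1 = List.foldl fmin a (evens t) :=
      le_antisymm (PySem.List.min?_isMin h1 _ (foldl_fmin_mem _ a))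
        (foldl_fmin_le _ a m1 (PySem.List.min?_mem h1))
    have e2 : m2 = List.foldl fmin b (odds t) :=
      le_antisymm (PySem.List.min?_isMin h2 _ (foldl_fmin_mem _ b))
        (foldl_fmin_le _ b m2 (PySem.List.min?_mem h2))
    have e3 : m3 = List.foldl fmax a (evens t) :=
      le_antisymm (foldl_fmax_ge _ a m3 (PySem.List.max?_mem h3))
        (PySem.List.max?_isMax h3 _ (foldl_fmax_mem _ a))
    have e4 : m4 = List.foldl fmax b (odds t) :=
      le_antisymm (foldl_fmax_ge _ b m4 (PySem.List.max?_mem h4))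
        (PySem.List.max?_isMax h4 _ (foldl_fmax_mem _ b))
    simp [e1, e2, e3, e4]
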